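-- pv_equiv track=rewrite | github.com/besasam/advent-of-code | 2023/12/12.py | trim_left
-- ===== SOURCE A (Python) =====
-- def trim_left(record, constraints):
--     if not constraints:
--         return record, constraints[:]
--     c = constraints[0]
--     chunks = record.split('.')
--     if len(chunks[0]) <= c:
--         return trim_left('.'.join(chunks[1:]), constraints[1:])
--     return record, constraints[:]
-- ===== SOURCE B (Python) =====
-- def trim_left(record, constraints):
--     # Single forward scan over record, tracking the current segment length and a
--     # constraint index; one slice at the end instead of repeated split/join.
--     ci = 0       # index of the next unmatched constraint
--     start = 0    # start of the remaining (untrimmed) part of record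
--     seglen = 0   # length of the current '.'-separated segment
--     for i, ch in enumerate(record):
--         if ch == '.':
--             if ci < len(constraints) and seglen <= constraints[ci]:
--                 ci += 1
--                 start = i + 1
--                 seglen = 0
--             else:
--                 return record[start:], constraints[ci:]
--         else:
--             seglen += 1
--     # end of record: the trailing segment, then empty segments while constraints fit
--     while ci < len(constraints) and seglen <= constraints[ci]:
--         ci += 1
--         start = len(record)
--         seglen = 0
--     return record[start:], constraints[ci:]
-- ===== Notes on version B (the rewrite author's own statement) =====
-- stated objective: faster
-- what changed: Replaced A's per-constraint recursion that re-splits and re-joins the whole record with a single forward scan over the record tracking the current segment length, a constraint index and a trim position, slicing once at the end.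
import Mathlib
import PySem

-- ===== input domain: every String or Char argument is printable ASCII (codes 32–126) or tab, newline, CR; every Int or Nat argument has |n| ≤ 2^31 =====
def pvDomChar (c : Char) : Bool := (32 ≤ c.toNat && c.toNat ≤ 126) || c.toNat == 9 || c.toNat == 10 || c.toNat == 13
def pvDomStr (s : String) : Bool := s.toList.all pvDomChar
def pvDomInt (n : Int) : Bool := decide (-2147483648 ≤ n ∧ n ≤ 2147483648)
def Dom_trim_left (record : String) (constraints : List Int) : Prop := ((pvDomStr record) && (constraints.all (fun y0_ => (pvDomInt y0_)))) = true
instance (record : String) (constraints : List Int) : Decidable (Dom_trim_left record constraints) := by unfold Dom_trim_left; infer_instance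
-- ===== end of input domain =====

-- B replaces A's recursive split/join per constraint by a single forward scan with
-- segment-length and constraint counters (objective: faster, asymptotic O(n*k) -> O(n+k)).


-- ===== PORT A =====
-- Literal transliteration of A on the character-list side ('record' as List Char;
-- per PYSEM, string work is done on .toList with the PySem.Chars primitives).
def trimLeftA (record : List Char) (constraints : List Int) : List Char × List Int :=
  match constraints with
  | [] => (record, [])                       -- return record, constraints[:] (a copy: same value)
  | c :: rest =>
    let chunks := PySem.Chars.splitOn record ['.']   -- record.split('.')
    -- chunks[0]: split never returns an empty list, so index 0 never raises
    if (PySem.List.len (PySem.List.pyGetD chunks 0 [])) ≤ c then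
      trimLeftA (PySem.Chars.join ['.'] (chunks.drop 1)) rest   -- '.'.join(chunks[1:])
    else (record, c :: rest)                 -- return record, constraints[:]

def trim_left (record : String) (constraints : List Int) : String × List Int :=
  let p := trimLeftA record.toList constraints
  (String.ofList p.1, p.2)

-- ===== PORT B =====
-- the trailing while loop of Source B: consume constraints while the current segment fits
def altWhile (full : List Char) (start seglen ci : Nat) (constraints : List Int) : List Char × List Int :=
  match h : constraints[ci]? with
  | some c =>
    if (seglen : Int) ≤ c then
      altWhile full full.length 0 (ci + 1) constraints
    else (full.drop start, constraints.drop ci)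
  | none => (full.drop start, constraints.drop ci)   -- record[start:], constraints[ci:]
termination_by constraints.length - ci
decreasing_by
  obtain ⟨hlt, -⟩ := List.getElem?_eq_some_iff.mp h
  omega

-- the for-loop of Source B over the enumerated characters of record
def altScan (full : List Char) (cs : List Char) (i ci start seglen : Nat)
    (constraints : List Int) : List Char × List Int :=
  match cs with
  | [] => altWhile full start seglen ci constraints
  | ch :: rest =>
    if ch = '.' then
      match constraints[ci]? with               -- ci < len(constraints) and seglen <= constraints[ci]
      | some c =>
        if (seglen : Int) ≤ c then
          altScan full rest (i + 1) (ci + 1) (i + 1) 0 constraints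
        else (full.drop start, constraints.drop ci)
      | none => (full.drop start, constraints.drop ci)
    else altScan full rest (i + 1) ci start (seglen + 1) constraints

def trim_left_alt (record : String) (constraints : List Int) : String × List Int :=
  let p := altScan record.toList record.toList 0 0 0 0 constraints
  (String.ofList p.1, p.2)

-- ===== PRECONDITION & SPEC =====
def Spec_trim_left (record : String) (constraints : List Int) (out : String × List Int) : Prop := out = trim_left_alt record constraints
instance (record : String) (constraints : List Int) (out : String × List Int) : Decidable (Spec_trim_left record constraints out) := by unfold Spec_trim_left; infer_instance

-- ===== CLAIM (what is proved, stated in full; the proofs are below) =====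
def Claim_equal_trim_left : Prop := ∀ (record : String) (constraints : List Int), Dom_trim_left record constraints → Spec_trim_left record constraints (trim_left record constraints)

-- ===== LEMMAS AND PROOFS =====

-- reference form of record.split('.') used to reason about both programs
def refSplit : List Char → List (List Char)
  | [] => [[]]
  | c :: rest =>
    if c = '.' then [] :: refSplit rest
    else
      match refSplit rest with
      | p :: ps => (c :: p) :: ps
      | [] => [[c]]

theorem refSplit_ne_nil (cs : List Char) : refSplit cs ≠ [] := by
  cases cs with
  | nil => simp [refSplit]
  | cons c rest =>
    simp only [refSplit]
    split_ifs
    · simp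
    · cases refSplit rest <;> simp

theorem go_eq_refSplit (cs : List Char) : ∀ (fuel : Nat) (cur : List Char) (acc : List (List Char)),
    cs.length < fuel →
    PySem.Chars.splitOn.go ['.'] fuel cs cur acc
      = acc.reverse ++ (refSplit cs).modifyHead (cur.reverse ++ ·) := by
  induction cs with
  | nil =>
    intro fuel cur acc h
    match fuel with
    | f + 1 => simp [PySem.Chars.splitOn.go, refSplit]
  | cons c rest ih =>
    intro fuel cur acc h
    match fuel with
    | f + 1 =>
      by_cases hc : c = '.'
      · subst hc
        have : PySem.Chars.splitOn.go ['.'] (f+1) ('.' :: rest) cur acc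
            = PySem.Chars.splitOn.go ['.'] f rest [] (cur.reverse :: acc) := by
          simp [PySem.Chars.splitOn.go, List.isPrefixOf]
        rw [this, ih f [] (cur.reverse :: acc) (by simpa using h)]
        simp [refSplit]
        cases h' : refSplit rest with
        | nil => exact absurd h' (refSplit_ne_nil rest)
        | cons p ps => simp
      · have hc' : ('.' : Char) ≠ c := Ne.symm hc
        have : PySem.Chars.splitOn.go ['.'] (f+1) (c :: rest) cur acc
            = PySem.Chars.splitOn.go ['.'] f rest (c :: cur) acc := by
          simp [PySem.Chars.splitOn.go, List.isPrefixOf, hc']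
        rw [this, ih f (c :: cur) acc (by simpa using h)]
        simp only [refSplit, if_neg hc]
        cases h' : refSplit rest with
        | nil => exact absurd h' (refSplit_ne_nil rest)
        | cons p ps => simp

theorem splitOn_eq_refSplit (cs : List Char) :
    PySem.Chars.splitOn cs ['.'] = refSplit cs := by
  have h := go_eq_refSplit cs (cs.length + 1) [] [] (by omega)
  have h2 : (refSplit cs).modifyHead (([] : List Char).reverse ++ ·) = refSplit cs := by
    cases refSplit cs <;> simp
  rw [PySem.Chars.splitOn, h, h2, List.reverse_nil, List.nil_append]

theorem refSplit_no_dot (cs : List Char) (h : ∀ a ∈ cs, a ≠ '.') : refSplit cs = [cs] := by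
  induction cs with
  | nil => rfl
  | cons c rest ih =>
    have hc : c ≠ '.' := h c (by simp)
    simp only [refSplit, if_neg hc, ih (fun a ha => h a (by simp [ha]))]

theorem refSplit_split (pre post : List Char) (h : ∀ a ∈ pre, a ≠ '.') :
    refSplit (pre ++ '.' :: post) = pre :: refSplit post := by
  induction pre with
  | nil => simp [refSplit]
  | cons c rest ih =>
    have hc : c ≠ '.' := h c (by simp)
    simp only [List.cons_append, refSplit, if_neg hc,
      ih (fun a ha => h a (by simp [ha]))]

theorem join_refSplit (cs : List Char) : PySem.Chars.join ['.'] (refSplit cs) = cs := by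
  induction cs with
  | nil => rfl
  | cons c rest ih =>
    simp only [refSplit]
    split_ifs with hc
    · subst hc
      cases h' : refSplit rest with
      | nil => exact absurd h' (refSplit_ne_nil rest)
      | cons p ps =>
        rw [h'] at ih
        simpa [PySem.Chars.join, List.intercalate] using congrArg (['.'] ++ ·) ih
    · cases h' : refSplit rest with
      | nil => exact absurd h' (refSplit_ne_nil rest)
      | cons p ps =>
        rw [h'] at ih
        cases ps with
        | nil => simpa [PySem.Chars.join, List.intercalate] using ih
        | cons q qs =>
          simpa [PySem.Chars.join, List.intercalate] using ih

-- every list of chars is dot-free or splits at its first dot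
theorem dot_decomp (cs : List Char) :
    (∀ a ∈ cs, a ≠ '.') ∨ ∃ pre post, cs = pre ++ '.' :: post ∧ ∀ a ∈ pre, a ≠ '.' := by
  induction cs with
  | nil => exact Or.inl (by simp)
  | cons c rest ih =>
    by_cases hc : c = '.'
    · exact Or.inr ⟨[], rest, by simp [hc], by simp⟩
    · cases ih with
      | inl h => exact Or.inl (by intro a ha; rcases List.mem_cons.mp ha with h' | h' <;> [exact h' ▸ hc; exact h a h'])
      | inr h =>
        obtain ⟨pre, post, heq, hpre⟩ := h
        refine Or.inr ⟨c :: pre, post, by simp [heq], ?_⟩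
        intro a ha
        rcases List.mem_cons.mp ha with h' | h'
        · exact h' ▸ hc
        · exact hpre a h'

-- scanning a dot-free chunk just advances the counters
theorem scan_chunk (full : List Char) (pre : List Char) (hpre : ∀ a ∈ pre, a ≠ '.') :
    ∀ (tail : List Char) (i ci start seglen : Nat) (constraints : List Int),
    altScan full (pre ++ tail) i ci start seglen constraints
      = altScan full tail (i + pre.length) ci start (seglen + pre.length) constraints := by
  induction pre with
  | nil => intro tail i ci start seglen constraints; simp
  | cons c rest ih =>
    intro tail i ci start seglen constraints
    have hc : c ≠ '.' := hpre c (by simp)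
    rw [List.cons_append, altScan, if_neg hc,
      ih (fun a ha => hpre a (by simp [ha])) tail (i+1) ci start (seglen+1) constraints]
    have h1 : i + 1 + rest.length = i + (rest.length + 1) := by omega
    have h2 : seglen + 1 + rest.length = seglen + (rest.length + 1) := by omega
    simp [h1, h2]

-- the trailing while loop agrees with A on a dot-free remainder
theorem while_eq (full : List Char) (constraints : List Int) :
    ∀ (rem : List Int) (ci start : Nat), constraints.drop ci = rem →
    (∀ a ∈ full.drop start, a ≠ '.') →
    altWhile full start (full.drop start).length ci constraints
      = trimLeftA (full.drop start) rem := by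
  intro rem
  induction rem with
  | nil =>
    intro ci start hdrop _
    have h0 : constraints[ci]? = none := by
      rw [← List.head?_drop, hdrop]; rfl
    rw [altWhile.eq_def]
    split
    · next c heq => rw [h0] at heq; cases heq
    · simp [hdrop, trimLeftA]
  | cons c rest ih =>
    intro ci start hdrop hfree
    have h0 : constraints[ci]? = some c := by
      rw [← List.head?_drop, hdrop]; rfl
    have hsplit : PySem.Chars.splitOn (full.drop start) ['.'] = [full.drop start] :=
      (splitOn_eq_refSplit _).trans (refSplit_no_dot _ hfree)
    have hrest : constraints.drop (ci + 1) = rest := by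
      rw [← List.tail_drop, hdrop]; rfl
    rw [altWhile.eq_def]
    split
    · next c' heq =>
      rw [h0] at heq
      injection heq with heq'
      subst heq'
      rw [trimLeftA]
      simp only [hsplit, PySem.List.pyGetD_zero_cons, PySem.List.len_eq]
      split_ifs with hle
      · have hdl : List.drop full.length full = ([] : List Char) := List.drop_length
        have := ih (ci + 1) full.length hrest (by rw [hdl]; simp)
        rw [hdl] at this
        have hj : PySem.Chars.join ['.'] (List.drop 1 [List.drop start full]) = ([] : List Char) := rfl
        rw [hj]
        exact this
      · simp [hdrop]
    · next heq => rw [h0] at heq; cases heq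

-- main loop lemma: the scan started at position m agrees with A's recursion on the suffix
theorem scan_eq (full : List Char) (constraints : List Int) :
    ∀ (rem : List Int) (m ci : Nat), constraints.drop ci = rem →
    altScan full (full.drop m) m ci m 0 constraints = trimLeftA (full.drop m) rem := by
  intro rem
  induction rem with
  | nil =>
    intro m ci hdrop
    have h0 : constraints[ci]? = none := by
      rw [← List.head?_drop, hdrop]; rfl
    rcases dot_decomp (full.drop m) with hfree | ⟨pre, post, heq, hpre⟩
    · have h1 := scan_chunk full (full.drop m) hfree [] m ci m 0 constraints
      rw [List.append_nil] at h1
      rw [h1]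
      simp only [altScan, Nat.zero_add]
      exact while_eq full constraints [] ci m hdrop hfree
    · rw [heq, scan_chunk full pre hpre ('.' :: post) m ci m 0 constraints]
      simp only [altScan, reduceIte, h0]
      rw [trimLeftA]
      simp [heq, hdrop]
  | cons c rest ih =>
    intro m ci hdrop
    have h0 : constraints[ci]? = some c := by
      rw [← List.head?_drop, hdrop]; rfl
    have hrest : constraints.drop (ci + 1) = rest := by
      rw [← List.tail_drop, hdrop]; rfl
    rcases dot_decomp (full.drop m) with hfree | ⟨pre, post, heq, hpre⟩
    · have h1 := scan_chunk full (full.drop m) hfree [] m ci m 0 constraints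
      rw [List.append_nil] at h1
      rw [h1]
      simp only [altScan, Nat.zero_add]
      exact while_eq full constraints (c :: rest) ci m hdrop hfree
    · rw [heq, scan_chunk full pre hpre ('.' :: post) m ci m 0 constraints]
      simp only [altScan, reduceIte, h0, Nat.zero_add]
      have hsplit : PySem.Chars.splitOn (pre ++ '.' :: post) ['.'] = pre :: refSplit post :=
        (splitOn_eq_refSplit _).trans (refSplit_split _ _ hpre)
      rw [trimLeftA]
      simp only [hsplit, PySem.List.pyGetD_zero_cons, PySem.List.len_eq]
      split_ifs with hle
      · have hpost : full.drop (m + pre.length + 1) = post := by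
          rw [show m + pre.length + 1 = m + (pre.length + 1) by omega, ← List.drop_drop]
          simp [heq]
        have := ih (m + pre.length + 1) (ci + 1) hrest
        rw [hpost] at this
        rw [this]
        congr 1
        simp only [List.drop_one, List.tail_cons]
        exact (join_refSplit post).symm
      · simp [heq, hdrop]

theorem trimLeft_eq (cs : List Char) (constraints : List Int) :
    altScan cs cs 0 0 0 0 constraints = trimLeftA cs constraints := by
  have := scan_eq cs constraints constraints 0 0 (by simp)
  simpa using this

-- ===== VERDICT (by name: the statement is the Claim_ definition above) =====
theorem trim_left_spec : Claim_equal_trim_left := by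
  intro record constraints _
  unfold Spec_trim_left trim_left trim_left_alt
  rw [trimLeft_eq]
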